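-- pv_equiv track=rewrite | github.com/igidae2026-creator/MapleWorld | scripts/repair_quest_surface_variety.py | _objective_hint
-- ===== SOURCE A (Python) =====
-- def _objective_hint(objectives: str) -> str:
--     parts = [part.strip() for part in objectives.split("|") if part.strip()]
--     has_kill = any(part.startswith("kill:") for part in parts)
--     has_collect = any(part.startswith("collect:") for part in parts)
--     if has_kill and has_collect:
--         return "처치와 회수 목표"
--     if has_kill:
--         return "처치 목표"
--     if has_collect:
--         return "회수 목표"
--     if any(part.startswith("boss:") for part in parts):
--         return "우두머리 확인"
--     return "맡은 일"
-- ===== SOURCE B (Python) =====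
-- _TABLE = (
--     "맡은 일",            # 0b000: nothing recognised
--     "처치 목표",          # 0b001: kill
--     "회수 목표",          # 0b010: collect
--     "처치와 회수 목표",    # 0b011: kill + collect
--     "우두머리 확인",      # 0b100: boss only
--     "처치 목표",          # 0b101: kill (boss ignored)
--     "회수 목표",          # 0b110: collect (boss ignored)
--     "처치와 회수 목표",    # 0b111: kill + collect (boss ignored)
-- )
--
--
-- def _objective_hint(objectives: str) -> str:
--     # Single pass: accumulate a 3-bit presence mask, then one table lookup.
--     mask = 0
--     for raw in objectives.split("|"):
--         part = raw.strip()
--         if part.startswith("kill:"):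
--             mask |= 1
--         if part.startswith("collect:"):
--             mask |= 2
--         if part.startswith("boss:"):
--             mask |= 4
--     return _TABLE[mask]
-- ===== Notes on version B (the rewrite author's own statement) =====
-- stated objective: alternative
-- what changed: B makes a single pass over the raw split pieces accumulating a 3-bit presence mask (kill=1, collect=2, boss=4) and returns the answer by one indexed lookup into an 8-entry table, replacing A's intermediate filtered parts list, its four separate any()/startswith scans and the branch cascade.
import Mathlib
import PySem

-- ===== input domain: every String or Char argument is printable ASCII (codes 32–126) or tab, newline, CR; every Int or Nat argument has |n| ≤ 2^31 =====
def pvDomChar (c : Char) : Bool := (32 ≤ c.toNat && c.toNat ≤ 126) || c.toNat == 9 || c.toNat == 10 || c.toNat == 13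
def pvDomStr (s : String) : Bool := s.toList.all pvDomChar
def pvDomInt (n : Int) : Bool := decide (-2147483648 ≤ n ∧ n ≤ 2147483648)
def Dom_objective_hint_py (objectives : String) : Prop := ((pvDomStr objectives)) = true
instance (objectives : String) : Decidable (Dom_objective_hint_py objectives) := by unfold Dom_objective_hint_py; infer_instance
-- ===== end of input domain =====

-- B makes a single pass accumulating a 3-bit presence mask and answers by one table
-- lookup, replacing A's filtered parts list, four any() scans and branch cascade (objective: alternative).

-- ===== PORT A =====
def objective_hint_py (objectives : String) : String :=
  let parts := (((PySem.Str.split? objectives "|").getD []).filter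
      (fun part => PySem.Str.strip part != "")).map PySem.Str.strip
  let has_kill := parts.any (fun part => PySem.Str.startswith part "kill:")
  let has_collect := parts.any (fun part => PySem.Str.startswith part "collect:")
  if has_kill && has_collect then "처치와 회수 목표"
  else if has_kill then "처치 목표"
  else if has_collect then "회수 목표"
  else if parts.any (fun part => PySem.Str.startswith part "boss:") then "우두머리 확인"
  else "맡은 일"

-- ===== PORT B =====
def pvObjTable : List String :=
  ["맡은 일", "처치 목표", "회수 목표", "처치와 회수 목표",
   "우두머리 확인", "처치 목표", "회수 목표", "처치와 회수 목표"]

-- loop body: strip the raw piece, or the matching bits into the mask (three ifs, as in Source B)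
def pvObjStep (m : Nat) (raw : String) : Nat :=
  let part := PySem.Str.strip raw
  let m := if PySem.Str.startswith part "kill:" then m ||| 1 else m
  let m := if PySem.Str.startswith part "collect:" then m ||| 2 else m
  if PySem.Str.startswith part "boss:" then m ||| 4 else m

def objective_hint_py_alt (objectives : String) : String :=
  let mask := ((PySem.Str.split? objectives "|").getD []).foldl pvObjStep 0
  -- _TABLE[mask]: mask < 8 always, so pyGet? is never none; getD only makes the lookup total
  (PySem.List.pyGet? pvObjTable (Int.ofNat mask)).getD ""

-- ===== PRECONDITION & SPEC =====
def Spec_objective_hint_py (objectives : String) (out : String) : Prop := out = objective_hint_py_alt objectives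
instance (objectives : String) (out : String) : Decidable (Spec_objective_hint_py objectives out) := by unfold Spec_objective_hint_py; infer_instance

-- ===== CLAIM (what is proved, stated in full; the proofs are below) =====
def Claim_equal_objective_hint_py : Prop := ∀ (objectives : String), Dom_objective_hint_py objectives → Spec_objective_hint_py objectives (objective_hint_py objectives)

-- ===== LEMMAS AND PROOFS =====

-- bits contributed by one raw piece (= pvObjStep 0 raw, proved below)
def pvObjBits (raw : String) : Nat :=
  (if PySem.Str.startswith (PySem.Str.strip raw) "kill:" then 1 else 0) |||
  (if PySem.Str.startswith (PySem.Str.strip raw) "collect:" then 2 else 0) |||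
  (if PySem.Str.startswith (PySem.Str.strip raw) "boss:" then 4 else 0)

theorem pv_step_eq (m : Nat) (raw : String) : pvObjStep m raw = m ||| pvObjBits raw := by
  unfold pvObjStep pvObjBits
  simp only [PySem.Str.startswith_eq]
  split_ifs <;> simp [Nat.lor_assoc]

theorem pv_foldl_acc (l : List String) (m : Nat) :
    l.foldl pvObjStep m = m ||| l.foldl pvObjStep 0 := by
  induction l generalizing m with
  | nil => simp [List.foldl]
  | cons x xs ih =>
    simp only [List.foldl_cons]
    rw [ih (pvObjStep m x), ih (pvObjStep 0 x), pv_step_eq, pv_step_eq 0, Nat.lor_assoc]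
    simp

-- a non-empty prefix forces a non-empty string
theorem pv_startswith_ne_empty (s kw : String) (hkw : kw.toList ≠ [])
    (h : PySem.Str.startswith s kw = true) : s ≠ "" := by
  intro hs
  subst hs
  rw [PySem.Str.startswith_eq, PySem.Chars.startswith_iff] at h
  have : kw.toList = [] := List.prefix_nil.mp (by simpa using h)
  exact hkw this

-- A's scan over the stripped-filtered parts equals the scan over the raw split pieces
theorem pv_any_raw (l : List String) (kw : String) (hkw : kw.toList ≠ []) :
    ((l.filter (fun part => PySem.Str.strip part != "")).map PySem.Str.strip).any
        (fun part => PySem.Str.startswith part kw)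
    = l.any (fun raw => PySem.Str.startswith (PySem.Str.strip raw) kw) := by
  rw [Bool.eq_iff_iff, List.any_eq_true, List.any_eq_true]
  constructor
  · rintro ⟨p, hp, hsw⟩
    obtain ⟨raw, hraw, rfl⟩ := List.mem_map.mp hp
    exact ⟨raw, (List.mem_filter.mp hraw).1, hsw⟩
  · rintro ⟨raw, hraw, hsw⟩
    refine ⟨PySem.Str.strip raw, List.mem_map.mpr ⟨raw, List.mem_filter.mpr ⟨hraw, ?_⟩, rfl⟩, hsw⟩
    simpa using pv_startswith_ne_empty _ kw hkw hsw

-- the mask of the whole loop, in terms of the three raw any-scans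
theorem pv_mask_eq (l : List String) :
    l.foldl pvObjStep 0
    = (if l.any (fun raw => PySem.Str.startswith (PySem.Str.strip raw) "kill:") then 1 else 0)
    ||| (if l.any (fun raw => PySem.Str.startswith (PySem.Str.strip raw) "collect:") then 2 else 0)
    ||| (if l.any (fun raw => PySem.Str.startswith (PySem.Str.strip raw) "boss:") then 4 else 0) := by
  induction l with
  | nil => simp [List.foldl]
  | cons x xs ih =>
    simp only [List.foldl_cons, List.any_cons]
    rw [pv_foldl_acc, pv_step_eq 0, ih]
    unfold pvObjBits
    rcases Bool.eq_false_or_eq_true (PySem.Str.startswith (PySem.Str.strip x) "kill:") with hk | hk <;>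
      rcases Bool.eq_false_or_eq_true (PySem.Str.startswith (PySem.Str.strip x) "collect:") with hc | hc <;>
        rcases Bool.eq_false_or_eq_true (PySem.Str.startswith (PySem.Str.strip x) "boss:") with hb | hb <;>
          rcases Bool.eq_false_or_eq_true (xs.any (fun raw => PySem.Str.startswith (PySem.Str.strip raw) "kill:")) with hks | hks <;>
            rcases Bool.eq_false_or_eq_true (xs.any (fun raw => PySem.Str.startswith (PySem.Str.strip raw) "collect:")) with hcs | hcs <;>
              rcases Bool.eq_false_or_eq_true (xs.any (fun raw => PySem.Str.startswith (PySem.Str.strip raw) "boss:")) with hbs | hbs <;>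
                simp only [hk, hc, hb, hks, hcs, hbs] <;> decide

-- ===== VERDICT (by name: the statement is the Claim_ definition above) =====
theorem objective_hint_py_spec : Claim_equal_objective_hint_py := by
  intro objectives _
  unfold Spec_objective_hint_py objective_hint_py objective_hint_py_alt
  simp only []
  rw [pv_mask_eq,
      pv_any_raw _ "kill:" (by decide), pv_any_raw _ "collect:" (by decide),
      pv_any_raw _ "boss:" (by decide)]
  rcases Bool.eq_false_or_eq_true (((PySem.Str.split? objectives "|").getD []).any
      (fun raw => PySem.Str.startswith (PySem.Str.strip raw) "kill:")) with hk | hk <;>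
    rcases Bool.eq_false_or_eq_true (((PySem.Str.split? objectives "|").getD []).any
        (fun raw => PySem.Str.startswith (PySem.Str.strip raw) "collect:")) with hc | hc <;>
      rcases Bool.eq_false_or_eq_true (((PySem.Str.split? objectives "|").getD []).any
          (fun raw => PySem.Str.startswith (PySem.Str.strip raw) "boss:")) with hb | hb <;>
        rw [hk, hc, hb] <;> decide
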